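-- pv_equiv track=rewrite | github.com/joshuarocksolid/ChoreBoyCodeStudio | app/intelligence/signature_service.py | _find_active_call_open_paren
-- ===== SOURCE A (Python) =====
-- def _find_active_call_open_paren(source_text: str, cursor_position: int) -> int | None:
--     depth = 0
--     for index in range(cursor_position - 1, -1, -1):
--         character = source_text[index]
--         if character == ")":
--             depth += 1
--             continue
--         if character == "(":
--             if depth == 0:
--                 return index
--             depth -= 1
--     return None
-- ===== SOURCE B (Python) =====
-- def _find_active_call_open_paren(source_text: str, cursor_position: int) -> int | None:
--     stack = []
--     for index in range(cursor_position):
--         character = source_text[index]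
--         if character == "(":
--             stack.append(index)
--         elif character == ")" and stack:
--             stack.pop()
--     return stack[-1] if stack else None
-- ===== Notes on version B (the rewrite author's own statement) =====
-- stated objective: idiomatic
-- what changed: B scans forward over the prefix keeping an explicit stack of open-paren indices (pop on ')', answer = stack top), instead of A's backward scan with a depth counter.
import Mathlib
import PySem

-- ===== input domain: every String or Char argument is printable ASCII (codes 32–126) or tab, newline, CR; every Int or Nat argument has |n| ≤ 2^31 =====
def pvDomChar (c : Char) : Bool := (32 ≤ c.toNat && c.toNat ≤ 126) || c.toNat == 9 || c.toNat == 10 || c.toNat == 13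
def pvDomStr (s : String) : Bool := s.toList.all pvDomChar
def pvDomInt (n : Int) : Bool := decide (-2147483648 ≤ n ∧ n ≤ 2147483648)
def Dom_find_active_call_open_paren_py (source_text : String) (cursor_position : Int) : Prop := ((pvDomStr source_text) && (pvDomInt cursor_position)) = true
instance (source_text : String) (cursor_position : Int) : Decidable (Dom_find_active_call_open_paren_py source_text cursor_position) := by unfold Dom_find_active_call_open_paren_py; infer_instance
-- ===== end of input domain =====

-- B replaces A's backward depth-counter scan by a forward scan keeping a stack of open-paren indices (idiomatic; same cost).

-- ===== PORT A =====
-- A's backward loop over range(cursor_position-1, -1, -1) with a depth counter and early return.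
def pvLoopA (s : List Char) : List Int → Int → Option Int
  | [], _ => none
  | i :: rest, depth =>
    match PySem.List.pyGet? s i with
    | none => none   -- Python raises IndexError here; excluded by Pre_
    | some ch =>
      if ch = ')' then pvLoopA s rest (depth + 1)
      else if ch = '(' then (if depth = 0 then some i else pvLoopA s rest (depth - 1))
      else pvLoopA s rest depth

def find_active_call_open_paren_py (source_text : String) (cursor_position : Int) : Option Int :=
  pvLoopA source_text.toList (PySem.List.pyRange (cursor_position - 1) (-1) (-1)) 0

-- ===== PORT B =====
-- one forward step of B: push '(' index, pop on ')' if the stack is non-empty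
def pvStepB (s : List Char) (stack : List Int) (i : Int) : List Int :=
  match PySem.List.pyGet? s i with
  | none => stack   -- Python raises IndexError here; excluded by Pre_
  | some ch =>
    if ch = '(' then stack ++ [i]
    else if ch = ')' ∧ stack ≠ [] then stack.dropLast
    else stack

def find_active_call_open_paren_py_alt (source_text : String) (cursor_position : Int) : Option Int :=
  ((PySem.List.pyRange 0 cursor_position 1).foldl (pvStepB source_text.toList) []).getLast?

-- ===== PRECONDITION & SPEC =====
-- Pre_ excludes exactly cursor_position > len(source_text): there both Pythons raise IndexError.
def Pre_find_active_call_open_paren_py (source_text : String) (cursor_position : Int) : Prop :=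
  cursor_position ≤ PySem.Str.len source_text
instance (source_text : String) (cursor_position : Int) : Decidable (Pre_find_active_call_open_paren_py source_text cursor_position) := by unfold Pre_find_active_call_open_paren_py; infer_instance
def pvWitness_find_active_call_open_paren_py : String × Int := ("f(x, g(y)", 8)
def Spec_find_active_call_open_paren_py (source_text : String) (cursor_position : Int) (out : Option Int) : Prop := out = find_active_call_open_paren_py_alt source_text cursor_position
instance (source_text : String) (cursor_position : Int) (out : Option Int) : Decidable (Spec_find_active_call_open_paren_py source_text cursor_position out) := by unfold Spec_find_active_call_open_paren_py; infer_instance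

-- ===== CLAIM (what is proved, stated in full; the proofs are below) =====
def Claim_equal_find_active_call_open_paren_py : Prop := ∀ (source_text : String) (cursor_position : Int), Dom_find_active_call_open_paren_py source_text cursor_position → Pre_find_active_call_open_paren_py source_text cursor_position → Spec_find_active_call_open_paren_py source_text cursor_position (find_active_call_open_paren_py source_text cursor_position)

-- ===== LEMMAS AND PROOFS =====

-- the forward stack after scanning indices [0, a)
def pvStack (s : List Char) (a : Int) : List Int :=
  (PySem.List.pyRange 0 a 1).foldl (pvStepB s) []

theorem pvStack_succ (s : List Char) (a : Int) (ha : 0 ≤ a) :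
    pvStack s (a + 1) = pvStepB s (pvStack s a) a := by
  unfold pvStack
  rw [PySem.List.pyRange_one_succ_right ha, List.foldl_append]
  rfl

-- main invariant: A's backward scan at depth d reads the d-th entry from the top of B's stack
theorem pvMain (s : List Char) (k : Nat) (hk : (k : Int) ≤ s.length) :
    ∀ d : Int, 0 ≤ d →
      pvLoopA s (PySem.List.pyRange ((k : Int) - 1) (-1) (-1)) d
        = (pvStack s k).reverse[d.toNat]? := by
  induction k with
  | zero =>
    intro d _
    rw [show ((0:Nat):Int) - 1 = -1 by norm_num,
        PySem.List.pyRange_neg_one_eq_nil (by norm_num)]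
    simp [pvLoopA, pvStack, PySem.List.pyRange_one_eq_nil]
  | succ k ih =>
    intro d hd
    have hk' : (k : Int) ≤ s.length := by push_cast at hk ⊢; omega
    have hklt : k < s.length := by exact_mod_cast (by push_cast at hk; omega : (k : Int) < s.length)
    have hget : PySem.List.pyGet? s (k : Int) = some s[k] :=
      PySem.List.pyGet?_ofNat s k hklt
    have hcons : PySem.List.pyRange (((k:Nat)+1 : Int) - 1) (-1) (-1)
        = (k : Int) :: PySem.List.pyRange ((k : Int) - 1) (-1) (-1) := by
      rw [show (((k:Nat)+1 : Int) - 1) = (k : Int) by ring]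
      exact PySem.List.pyRange_neg_one_cons (by omega)
    have hsucc : pvStack s ((k : Nat) + 1 : Int) = pvStepB s (pvStack s k) k :=
      pvStack_succ s k (by omega)
    push_cast
    push_cast at hcons hsucc
    rw [hcons, hsucc]
    unfold pvLoopA pvStepB
    rw [hget]
    by_cases hcl : s[k] = ')'
    · simp only [hcl, reduceIte, ne_eq, true_and]
      by_cases hnil : pvStack s (k : Int) = []
      · rw [ih hk' (d + 1) (by omega)]
        simp [hnil]
      · rw [if_pos hnil, if_neg (by decide : ¬(')' = '(')),
            ih hk' (d + 1) (by omega), ← List.tail_reverse,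
            show (d+1).toNat = d.toNat + 1 by omega]
        cases hrev : (pvStack s (k : Int)).reverse with
        | nil => exact absurd (by simpa using hrev) hnil
        | cons x xs => simp
    · by_cases hop : s[k] = '('
      · simp only [hop, reduceIte]
        by_cases hd0 : d = 0
        · subst hd0; simp
        · rw [if_neg hd0, ih hk' (d - 1) (by omega), List.reverse_append,
              show d.toNat = (d-1).toNat + 1 by omega]
          simp
      · simp only [hcl, hop, reduceIte, ne_eq]
        rw [if_neg (fun h => h.1)]
        exact ih hk' d hd

-- ===== VERDICT (by name: the statement is the Claim_ definition above) =====
theorem find_active_call_open_paren_py_spec : Claim_equal_find_active_call_open_paren_py := by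
  intro source_text c _hdom hpre
  unfold Spec_find_active_call_open_paren_py
  unfold find_active_call_open_paren_py find_active_call_open_paren_py_alt
  by_cases hc : c ≤ 0
  · rw [PySem.List.pyRange_neg_one_eq_nil (by omega),
        PySem.List.pyRange_one_eq_nil hc]
    simp [pvLoopA]
  · have hc0 : 0 ≤ c := by omega
    have hcl : c = ((c.toNat : Nat) : Int) := by omega
    have hlen : (c.toNat : Int) ≤ source_text.toList.length := by
      have := hpre; unfold Pre_find_active_call_open_paren_py at this
      simp [PySem.Str.len] at this
      rw [String.length_toList]; omega
    rw [hcl]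
    rw [pvMain source_text.toList c.toNat hlen 0 le_rfl]
    rw [show ((0:Int)).toNat = 0 from rfl,
        ← List.head?_eq_getElem?, List.head?_reverse]
    rfl
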